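-- pv_equiv track=rewrite | github.com/bogdaniordache/Coursera | L2P Crafting Quality Code/A1 Choosing and Writing Test Cases/a1.py | swap_k
-- ===== SOURCE A (Python) =====
-- def swap_k(L, k):
--     """ (list) -> NoneType
--
--     Precondtion: 0 <= k <= len(L) // 2
--
--     Swap the first k items of L with the last k items of L.
--
--     >>> nums = [1, 2, 3, 4, 5, 6]
--     >>> swap_k(nums, 2)
--     >>> nums
--     [5, 6, 3, 4, 1, 2]
--     >>> nums = [1, 2, 3, 4, 5, 6, 7]
--     >>> swap_k(nums, 2)
--     >>> nums
--     [6, 7, 3, 4, 5, 1, 2]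
--     """
--     l = len(L)
--     if k < 0 or k > l//2:
--         return L
--     for i in range(0, k):
--         a = L[i]
--         L[i] = L[l + i - k]
--         L[l + i - k] = a
--     return L
-- ===== SOURCE B (Python) =====
-- def swap_k(L, k):
--     l = len(L)
--     if k < 0 or k > l//2:
--         return L
--     L[:] = L[l-k:] + L[k:l-k] + L[:k]
--     return L
-- ===== Notes on version B (the rewrite author's own statement) =====
-- stated objective: idiomatic
-- what changed: Replaces A's per-index swap loop with temporary variable by a single slice reassembly L[:] = L[l-k:] + L[k:l-k] + L[:k] after the same guard.
import Mathlib
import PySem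

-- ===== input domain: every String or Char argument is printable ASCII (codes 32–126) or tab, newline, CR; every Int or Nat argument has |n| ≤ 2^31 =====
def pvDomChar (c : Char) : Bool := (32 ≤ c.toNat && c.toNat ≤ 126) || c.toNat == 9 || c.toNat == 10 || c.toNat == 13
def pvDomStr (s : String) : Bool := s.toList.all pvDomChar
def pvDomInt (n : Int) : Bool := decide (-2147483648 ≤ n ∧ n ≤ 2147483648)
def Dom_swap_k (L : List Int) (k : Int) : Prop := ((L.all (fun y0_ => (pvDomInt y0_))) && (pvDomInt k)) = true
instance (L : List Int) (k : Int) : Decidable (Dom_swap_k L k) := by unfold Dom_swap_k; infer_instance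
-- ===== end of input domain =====

-- B replaces A's element-by-element swap loop with one slice reassembly (idiomatic);
-- both mutate L in place the same way in Python, the theorems here are about the return value.

-- ===== PORT A =====
-- one iteration of A's loop: a = L[i]; L[i] = L[l+i-k]; L[l+i-k] = a
-- (inside the guard every index is in range, so getD 0 equals Python's L[_])
def swapStepA (l k : Nat) (xs : List Int) (i : Nat) : List Int :=
  let a := xs.getD i 0
  let xs' := xs.set i (xs.getD (l + i - k) 0)
  xs'.set (l + i - k) a

def swap_k (L : List Int) (k : Int) : List Int :=
  let l := L.length
  if k < 0 ∨ (l : Int) / 2 < k then L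
  else (List.range k.toNat).foldl (swapStepA l k.toNat) L

-- ===== PORT B =====
-- B: guard, then L[l-k:] + L[k:l-k] + L[:k]
def swap_k_alt (L : List Int) (k : Int) : List Int :=
  let l := L.length
  if k < 0 ∨ (l : Int) / 2 < k then L
  else PySem.List.slice L (some ((l : Int) - k)) none
        ++ PySem.List.slice L (some k) (some ((l : Int) - k))
        ++ PySem.List.slice L none (some k)

-- ===== PRECONDITION & SPEC =====
def Spec_swap_k (L : List Int) (k : Int) (out : List Int) : Prop := out = swap_k_alt L k
instance (L : List Int) (k : Int) (out : List Int) : Decidable (Spec_swap_k L k out) := by unfold Spec_swap_k; infer_instance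

-- ===== CLAIM (what is proved, stated in full; the proofs are below) =====
def Claim_equal_swap_k : Prop := ∀ (L : List Int) (k : Int), Dom_swap_k L k → Spec_swap_k L k (swap_k L k)

-- ===== LEMMAS AND PROOFS =====

theorem foldl_swapStepA_length (l k n : Nat) (xs : List Int) :
    ((List.range n).foldl (swapStepA l k) xs).length = xs.length := by
  induction n generalizing xs with
  | zero => rfl
  | succ n ih => rw [List.range_succ, List.foldl_append]; simp [swapStepA, ih]

-- elementwise description of one swap step
theorem swapStepA_getElem? (l k : Nat) (xs : List Int) (i j : Nat)
    (hl : xs.length = l) (hi : i < k) (hk : 2 * k <= l) :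
    (swapStepA l k xs i)[j]? =
      if j = i then xs[l + i - k]? else if j = l + i - k then xs[i]? else xs[j]? := by
  have hiL : i < xs.length := by omega
  have hsL : l + i - k < xs.length := by omega
  unfold swapStepA
  simp only [List.getElem?_set, List.length_set,
    List.getD_eq_getElem xs 0 hiL, List.getD_eq_getElem xs 0 hsL]
  split_ifs <;> first
    | rfl
    | omega
    | (rw [List.getElem?_eq_getElem hsL])
    | (rw [List.getElem?_eq_getElem hiL])

-- after n steps of the loop: the first n slots hold the corresponding tail elements,
-- slots l-k .. l-k+n-1 hold the corresponding head elements, everything else is untouched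
theorem foldl_swapStepA_getElem? (l k : Nat) (xs : List Int)
    (hl : xs.length = l) (hk : 2 * k <= l) :
    ∀ n, n <= k → ∀ j,
      ((List.range n).foldl (swapStepA l k) xs)[j]? =
        if j < n then xs[l - k + j]?
        else if l - k <= j ∧ j < l - k + n then xs[j - (l - k)]?
        else xs[j]? := by
  intro n
  induction n with
  | zero => intro _ j; simp
  | succ n ih =>
    intro hn j
    rw [List.range_succ, List.foldl_append]
    simp only [List.foldl_cons, List.foldl_nil]
    have hlen : ((List.range n).foldl (swapStepA l k) xs).length = l := by
      rw [foldl_swapStepA_length]; exact hl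
    rw [swapStepA_getElem? l k _ n j hlen (by omega) hk]
    rw [ih (by omega) (l + n - k), ih (by omega) n, ih (by omega) j]
    split_ifs <;> first
      | rfl
      | omega
      | (congr 1; omega)

theorem swap_k_eq_alt (L : List Int) (k : Int) : swap_k L k = swap_k_alt L k := by
  unfold swap_k swap_k_alt
  by_cases hg : k < 0 ∨ (L.length : Int) / 2 < k
  · simp [hg]
  · simp only [if_neg hg]
    push Not at hg
    obtain ⟨hk0, hk2⟩ := hg
    set l := L.length with hl
    set kn := k.toNat with hkn
    have hkek : (kn : Int) = k := Int.toNat_of_nonneg hk0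
    have h2k : 2 * kn <= l := by omega
    have hsub : (l : Int) - k = ((l - kn : Nat) : Int) := by omega
    rw [hsub, ← hkek]
    rw [PySem.List.slice_from_natCast, PySem.List.slice_natCast, PySem.List.slice_to_natCast]
    apply List.ext_getElem?
    intro j
    rw [foldl_swapStepA_getElem? l kn L rfl h2k kn (le_refl kn) j]
    simp only [List.getElem?_append, List.length_append, List.length_drop, List.length_take,
      List.getElem?_drop, List.getElem?_take, ← hl]
    split_ifs <;> first
      | rfl
      | omega
      | (congr 1; omega)
      | (rw [List.getElem?_eq_none (by omega : L.length <= j)])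

-- ===== VERDICT (by name: the statement is the Claim_ definition above) =====
theorem swap_k_spec : Claim_equal_swap_k := by
  intro L k _
  exact swap_k_eq_alt L k
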